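-- pv_equiv track=rewrite | github.com/kukunarapulikitha/fda-recall-surveillance | src/analytics/categorize.py | _first_keyword_match
-- ===== SOURCE A (Python) =====
-- def _first_keyword_match(text_blob: str, rules: list[tuple[str, tuple[str, ...]]]) -> str:
--     """Return the first category whose keyword list matches the blob, else 'Other'."""
--     if not text_blob:
--         return "Other"
--     haystack = text_blob.lower()
--     for label, keywords in rules:
--         for kw in keywords:
--             if kw in haystack:
--                 return label
--     return "Other"
-- ===== SOURCE B (Python) =====
-- def _first_keyword_match(text_blob: str, rules: list[tuple[str, tuple[str, ...]]]) -> str: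
--     """Multi-pattern position scan: flatten the rules into (rule_index, keyword)
--     patterns, then walk the haystack left to right, at each position testing every
--     pattern as a prefix of the remaining suffix and keeping the lowest matching
--     rule index; stop as soon as rule 0 has matched, since no later match can beat
--     it. Return that rule's label, else 'Other'."""
--     if not text_blob:
--         return "Other"
--     haystack = text_blob.lower()
--     patterns = [(i, kw) for i, (_label, keywords) in enumerate(rules) for kw in keywords]
--     best = None
--     for j in range(len(haystack)):
--         for i, kw in patterns:
--             if (best is None or i < best) and haystack.startswith(kw, j):
--                 best = i
--         if best == 0:
--             break
--     return rules[best][0] if best is not None else "Other"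
-- ===== Notes on version B (the rewrite author's own statement) =====
-- stated objective: alternative
-- what changed: A scans rule-by-rule, testing each keyword for substring containment and early-returning the first hit; B flattens the rules into (rule-index, keyword) patterns and walks the haystack position by position, testing every pattern as a prefix of the remaining suffix and keeping the lowest matching rule index (stopping once rule 0 matches), then looks the winning rule's label up at the end.
import Mathlib
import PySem

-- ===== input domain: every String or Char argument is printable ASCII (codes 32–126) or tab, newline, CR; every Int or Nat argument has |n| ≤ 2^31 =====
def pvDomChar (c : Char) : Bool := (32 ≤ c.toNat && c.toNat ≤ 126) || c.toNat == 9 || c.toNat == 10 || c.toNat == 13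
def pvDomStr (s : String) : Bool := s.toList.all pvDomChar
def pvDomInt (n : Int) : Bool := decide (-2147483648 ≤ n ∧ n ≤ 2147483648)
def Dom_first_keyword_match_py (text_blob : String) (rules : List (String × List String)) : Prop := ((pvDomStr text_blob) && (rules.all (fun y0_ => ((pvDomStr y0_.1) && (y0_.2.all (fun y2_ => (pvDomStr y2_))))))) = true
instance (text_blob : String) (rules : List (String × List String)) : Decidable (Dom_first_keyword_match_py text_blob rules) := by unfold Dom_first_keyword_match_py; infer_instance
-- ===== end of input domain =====

-- B replaces A's rule-by-rule containment loop with a multi-pattern position scan: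
-- flatten the rules into (rule-index, keyword) patterns, walk the haystack position by
-- position testing each pattern as a prefix of the remaining suffix, keep the lowest
-- matching rule index (stopping once rule 0 matches) — objective: alternative algorithm.


-- ===== PORT A =====
-- inner loop 'for kw in keywords: if kw in haystack: return label' (the early return as short-circuit Bool)
def aInner (hay : String) : List String → Bool
  | [] => false
  | kw :: rest => if PySem.Str.isIn kw hay then true else aInner hay rest

-- outer loop 'for label, keywords in rules: … return label'
def aLoop (hay : String) : List (String × List String) → String
  | [] => "Other"
  | (label, kws) :: rest => if aInner hay kws then label else aLoop hay rest

def first_keyword_match_py (text_blob : String) (rules : List (String × List String)) : String :=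
  if text_blob == "" then "Other"        -- 'if not text_blob: return "Other"'
  else aLoop (PySem.Str.lower text_blob) rules

-- ===== PORT B =====
-- '[(i, kw) for i, (_label, keywords) in enumerate(rules) for kw in keywords]'
def bIndexed : Nat → List (String × List String) → List (Nat × String)
  | _, [] => []
  | i, r :: rest => (r.2.map (fun kw => (i, kw))) ++ bIndexed (i + 1) rest

-- 'if (best is None or i < best) and haystack.startswith(kw, j): best = i'
-- haystack.startswith(kw, j) with 0 ≤ j is exactly kw.toList.isPrefixOf (h.drop j)
def bStep (h : List Char) (j : Nat) (best : Option Nat) (p : Nat × String) : Option Nat :=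
  if (match best with | none => true | some m => decide (p.1 < m)) && p.2.toList.isPrefixOf (h.drop j)
  then some p.1 else best

-- 'for j in range(len(haystack)): for i, kw in patterns: …; if best == 0: break'
def bScan (h : List Char) (pats : List (Nat × String)) : List Nat → Option Nat → Option Nat
  | [], best => best
  | j :: rest, best =>
    let best' := pats.foldl (bStep h j) best
    if best' == some 0 then best' else bScan h pats rest best'

def first_keyword_match_py_alt (text_blob : String) (rules : List (String × List String)) : String :=
  if text_blob == "" then "Other"
  else
    let hay := PySem.Str.lower text_blob             -- haystack = text_blob.lower()
    let h := hay.toList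
    let pats := bIndexed 0 rules
    -- range over a nonnegative bound, so List.range is exact for range(len(haystack))
    let best := bScan h pats (List.range h.length) none
    match best with
    | some b => ((PySem.List.pyGet? rules ((b : Nat) : Int)).map Prod.fst).getD "Other"  -- rules[best][0]; index always in range
    | none => "Other"

-- ===== PRECONDITION & SPEC =====
def Spec_first_keyword_match_py (text_blob : String) (rules : List (String × List String)) (out : String) : Prop := out = first_keyword_match_py_alt text_blob rules
instance (text_blob : String) (rules : List (String × List String)) (out : String) : Decidable (Spec_first_keyword_match_py text_blob rules out) := by unfold Spec_first_keyword_match_py; infer_instance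

-- ===== CLAIM (what is proved, stated in full; the proofs are below) =====
def Claim_equal_first_keyword_match_py : Prop := ∀ (text_blob : String) (rules : List (String × List String)), Dom_first_keyword_match_py text_blob rules → Spec_first_keyword_match_py text_blob rules (first_keyword_match_py text_blob rules)

-- ===== LEMMAS AND PROOFS =====

-- option-min update
def omin (b : Option Nat) (i : Nat) : Option Nat :=
  match b with
  | none => some i
  | some m => if i < m then some i else some m

theorem bStep_eq_omin (h : List Char) (j : Nat) (b : Option Nat) (p : Nat × String) :
    bStep h j b p = if p.2.toList.isPrefixOf (h.drop j) then omin b p.1 else b := by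
  cases b
  · simp [bStep, omin]
  · simp [bStep, omin]; split_ifs <;> simp_all

-- the inner fold is an omin-fold over the matched indices at position j
theorem inner_fold_eq (h : List Char) (j : Nat) :
    ∀ (l : List (Nat × String)) (b : Option Nat),
      l.foldl (bStep h j) b
        = ((l.filter (fun p => p.2.toList.isPrefixOf (h.drop j))).map Prod.fst).foldl omin b := by
  intro l
  induction l with
  | nil => intro b; rfl
  | cons p rest ih =>
    intro b
    by_cases hp : p.2.toList.isPrefixOf (h.drop j)
    · simp [List.foldl_cons, bStep_eq_omin, hp, ih]
    · simp [List.foldl_cons, bStep_eq_omin, hp, ih]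

-- the double fold is an omin-fold over the concatenation over positions
theorem outer_fold_eq (h : List Char) (pats : List (Nat × String)) :
    ∀ (js : List Nat) (b : Option Nat),
      js.foldl (fun b j => pats.foldl (bStep h j) b) b
        = (js.flatMap (fun j => ((pats.filter (fun p => p.2.toList.isPrefixOf (h.drop j))).map Prod.fst))).foldl omin b := by
  intro js
  induction js with
  | nil => intro b; rfl
  | cons j rest ih =>
    intro b
    rw [List.foldl_cons, List.flatMap_cons, List.foldl_append, ih, inner_fold_eq]

theorem omin_some (m i : Nat) : omin (some m) i = some (min m i) := by
  show (if i < m then some i else some m) = some (min m i)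
  rcases Nat.lt_or_ge i m with hc | hc
  · rw [if_pos hc]; congr 1; omega
  · rw [if_neg (by omega)]; congr 1; omega

theorem foldl_omin_some (l : List Nat) : ∀ a : Nat, l.foldl omin (some a) = some (l.foldl min a) := by
  induction l with
  | nil => intro a; rfl
  | cons x rest ih => intro a; simp [List.foldl_cons, omin_some, ih]

theorem foldl_omin_eq_min? (l : List Nat) : l.foldl omin none = l.min? := by
  cases l with
  | nil => rfl
  | cons a rest => rw [List.foldl_cons, List.min?_cons']; exact foldl_omin_some rest a

-- an accumulator of some 0 freezes the omin-fold
theorem foldl_omin_zero (L : List Nat) : L.foldl omin (some 0) = some 0 := by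
  rw [foldl_omin_some]
  congr 1
  induction L with
  | nil => rfl
  | cons x rest ih => simpa [List.foldl_cons] using ih

-- the frozen state propagates through whole positions
theorem scan_fold_zero (h : List Char) (pats : List (Nat × String)) :
    ∀ js : List Nat, js.foldl (fun b j => pats.foldl (bStep h j) b) (some 0) = some 0 := by
  intro js
  induction js with
  | nil => rfl
  | cons j rest ih => rw [List.foldl_cons, inner_fold_eq, foldl_omin_zero, ih]

-- the early 'break' never changes the scan's result
theorem bScan_eq (h : List Char) (pats : List (Nat × String)) :
    ∀ (js : List Nat) (best : Option Nat),
      bScan h pats js best = js.foldl (fun b j => pats.foldl (bStep h j) b) best := by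
  intro js
  induction js with
  | nil => intro best; rfl
  | cons j rest ih =>
    intro best
    by_cases hc : (pats.foldl (bStep h j) best == some (0 : Nat)) = true
    · have h0 : pats.foldl (bStep h j) best = some 0 := by simpa using hc
      rw [show bScan h pats (j :: rest) best = pats.foldl (bStep h j) best by
            simp [bScan, hc],
          List.foldl_cons, h0, scan_fold_zero]
    · rw [show bScan h pats (j :: rest) best = bScan h pats rest (pats.foldl (bStep h j) best) by
            simp [bScan, hc],
          ih, List.foldl_cons]

-- membership in bIndexed
theorem mem_bIndexed (i : Nat) (kw : String) :
    ∀ (rules : List (String × List String)) (k : Nat),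
      ((i, kw) ∈ bIndexed k rules ↔ ∃ d r, rules[d]? = some r ∧ i = k + d ∧ kw ∈ r.2) := by
  intro rules
  induction rules with
  | nil => intro k; simp [bIndexed]
  | cons r rest ih =>
    intro k
    simp only [bIndexed, List.mem_append, List.mem_map, ih (k + 1)]
    constructor
    · rintro (⟨kw', hkw', heq⟩ | ⟨d, r', hd, hi, hkw⟩)
      · have h1 : k = i := congrArg Prod.fst heq
        have h2 : kw' = kw := congrArg Prod.snd heq
        exact ⟨0, r, by simp, by omega, h2 ▸ hkw'⟩
      · exact ⟨d + 1, r', by simpa using hd, by omega, hkw⟩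
    · rintro ⟨d, r', hd, hi, hkw⟩
      cases d with
      | zero =>
        have hr : r' = r := by simpa using hd.symm
        left; exact ⟨kw, hr ▸ hkw, by simp [hi]⟩
      | succ d' =>
        right; exact ⟨d', r', by simpa using hd, by omega, hkw⟩

-- bounded positions suffice for containment (nonempty haystack)
theorem exists_bounded_prefix_iff (kw h : List Char) (hne : h ≠ []) :
    (∃ j < h.length, kw <+: h.drop j) ↔ PySem.Chars.isIn kw h = true := by
  constructor
  · rintro ⟨j, _, hj⟩
    exact (PySem.Chars.exists_prefix_drop_iff_isIn kw h).mp ⟨j, hj⟩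
  · intro hin
    obtain ⟨j, hj⟩ := (PySem.Chars.exists_prefix_drop_iff_isIn kw h).mpr hin
    by_cases hlt : j < h.length
    · exact ⟨j, hlt, hj⟩
    · have hdrop : h.drop j = [] := List.drop_eq_nil_of_le (by omega)
      have hkw : kw = [] := List.prefix_nil.mp (hdrop ▸ hj)
      exact ⟨0, by cases h with | nil => exact absurd rfl hne | cons a t => simp, by simp [hkw]⟩

-- the rule-level match predicate
def ruleHit (h : List Char) (r : String × List String) : Prop :=
  ∃ kw ∈ r.2, PySem.Chars.isIn kw.toList h = true

-- a matched index in B's scan list comes from a matching rule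
theorem bigL_fwd (hay : String) (rules : List (String × List String)) (i : Nat)
    (h : i ∈ (List.range hay.toList.length).flatMap
          (fun j => (((bIndexed 0 rules).filter
              (fun p => p.2.toList.isPrefixOf (hay.toList.drop j))).map Prod.fst))) :
    ∃ r, rules[i]? = some r ∧ ruleHit hay.toList r := by
  simp only [List.mem_flatMap, List.mem_map, List.mem_filter, List.mem_range] at h
  obtain ⟨j, hj, ⟨i', kw⟩, ⟨hmem, hpre⟩, rfl⟩ := h
  obtain ⟨d, r, hd, hi, hkw⟩ := (mem_bIndexed i' kw rules 0).mp hmem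
  refine ⟨r, by rw [hi, Nat.zero_add]; exact hd, kw, hkw, ?_⟩
  exact (PySem.Chars.exists_prefix_drop_iff_isIn kw.toList hay.toList).mp
    ⟨j, List.isPrefixOf_iff_prefix.mp hpre⟩

-- a matching rule yields its own index in B's scan list
theorem bigL_bwd (hay : String) (hne : hay.toList ≠ []) (rules : List (String × List String)) (i : Nat)
    (r : String × List String) (hr : rules[i]? = some r) (hhit : ruleHit hay.toList r) :
    i ∈ (List.range hay.toList.length).flatMap
          (fun j => (((bIndexed 0 rules).filter
              (fun p => p.2.toList.isPrefixOf (hay.toList.drop j))).map Prod.fst)) := by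
  obtain ⟨kw, hkw, hin⟩ := hhit
  have hmem : (i, kw) ∈ bIndexed 0 rules :=
    (mem_bIndexed i kw rules 0).mpr ⟨i, r, hr, by omega, hkw⟩
  obtain ⟨j, hj, hpre⟩ := (exists_bounded_prefix_iff kw.toList hay.toList hne).mpr hin
  simp only [List.mem_flatMap, List.mem_map, List.mem_filter, List.mem_range]
  exact ⟨j, hj, (i, kw), ⟨hmem, List.isPrefixOf_iff_prefix.mpr hpre⟩, rfl⟩

-- A's inner loop decides ruleHit
theorem aInner_eq (hay : String) (kws : List String) :
    aInner hay kws = true ↔ ∃ kw ∈ kws, PySem.Chars.isIn kw.toList hay.toList = true := by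
  induction kws with
  | nil => simp [aInner]
  | cons kw rest ih =>
    by_cases hkw : PySem.Str.isIn kw hay = true
    · simp only [aInner, if_pos hkw, List.mem_cons, true_iff]
      exact ⟨kw, Or.inl rfl, by simpa [PySem.Str.isIn_eq] using hkw⟩
    · simp only [aInner, hkw]
      simp only [Bool.false_eq_true, if_false, ih, List.mem_cons]
      constructor
      · rintro ⟨kw', h1, h2⟩; exact ⟨kw', Or.inr h1, h2⟩
      · rintro ⟨kw', h1 | h1, h2⟩
        · exact absurd h2 (by simpa [PySem.Str.isIn_eq, h1] using hkw)
        · exact ⟨kw', h1, h2⟩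

-- A returns "Other" when no rule matches
theorem aLoop_none (hay : String) :
    ∀ rules : List (String × List String),
      (∀ r ∈ rules, ¬ ruleHit hay.toList r) → aLoop hay rules = "Other" := by
  intro rules
  induction rules with
  | nil => intro _; rfl
  | cons r rest ih =>
    intro hno
    have h0 : ¬ ruleHit hay.toList r := hno r (by simp)
    have : aInner hay r.2 ≠ true := by
      intro hc; exact h0 ((aInner_eq hay r.2).mp hc)
    simp only [Bool.not_eq_true] at this
    cases r with
    | mk label kws =>
      simp only [aLoop]
      rw [if_neg (by simpa using this)]
      exact ih (fun r' hr' => hno r' (by simp [hr']))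

-- A returns the label of the least matching rule index
theorem aLoop_some (hay : String) :
    ∀ (rules : List (String × List String)) (m : Nat) (r : String × List String),
      rules[m]? = some r → ruleHit hay.toList r →
      (∀ k < m, ∀ r', rules[k]? = some r' → ¬ ruleHit hay.toList r') →
      aLoop hay rules = r.1 := by
  intro rules
  induction rules with
  | nil => intro m r hm; simp at hm
  | cons r0 rest ih =>
    intro m r hm hhit hmin
    cases m with
    | zero =>
      have hm' : r0 = r := by simpa using hm
      subst hm'
      cases r0 with
      | mk label kws =>
        simp only [aLoop]
        rw [if_pos ((aInner_eq hay kws).mpr hhit)]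
    | succ m' =>
      have h0 : ¬ ruleHit hay.toList r0 := hmin 0 (by omega) r0 (by simp)
      cases r0 with
      | mk label kws =>
        simp only [aLoop]
        rw [if_neg (by intro hc; exact h0 ((aInner_eq hay kws).mp hc))]
        exact ih m' r (by simpa using hm) hhit
          (fun k hk r' hr' => hmin (k + 1) (by omega) r' (by simpa using hr'))

-- lower preserves nonemptiness of the character list
theorem lower_toList_ne_nil (s : String) (hs : s ≠ "") :
    (PySem.Str.lower s).toList ≠ [] := by
  have hlen : (PySem.Str.lower s).toList.length = s.toList.length := by
    simp [PySem.Str.toList_lower, PySem.Chars.lower]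
  intro hnil
  have h0 : s.toList.length = 0 := by rw [← hlen, hnil]; rfl
  have h1 : s.toList = [] := List.eq_nil_of_length_eq_zero h0
  exact hs (by simpa using congrArg String.ofList h1)

-- ===== VERDICT (by name: the statement is the Claim_ definition above) =====
theorem first_keyword_match_py_spec : Claim_equal_first_keyword_match_py := by
  intro text_blob rules _
  unfold Spec_first_keyword_match_py first_keyword_match_py first_keyword_match_py_alt
  by_cases hempty : text_blob == ""
  · simp [hempty]
  · simp only [hempty, Bool.false_eq_true, if_false]
    set hay := PySem.Str.lower text_blob with hhay
    have hne : hay.toList ≠ [] :=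
      lower_toList_ne_nil text_blob (by simpa using hempty)
    set pats := bIndexed 0 rules with hpats
    set bigL := (List.range hay.toList.length).flatMap
          (fun j => ((pats.filter (fun p => p.2.toList.isPrefixOf (hay.toList.drop j))).map Prod.fst)) with hbigL
    have hfold : bScan hay.toList pats (List.range hay.toList.length) none = bigL.min? := by
      rw [bScan_eq, outer_fold_eq, ← hbigL, foldl_omin_eq_min?]
    rw [hfold]
    cases hmin : bigL.min? with
    | none =>
      have hnil : bigL = [] := List.min?_eq_none_iff.mp hmin
      have hno : ∀ r ∈ rules, ¬ ruleHit hay.toList r := by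
        intro r hr hhit
        obtain ⟨i, hi⟩ := List.mem_iff_getElem?.mp hr
        have hmem := bigL_bwd hay hne rules i r hi hhit
        rw [← hpats, ← hbigL, hnil] at hmem
        simp at hmem
      exact aLoop_none hay rules hno
    | some m =>
      obtain ⟨hmem, hle⟩ := List.min?_eq_some_iff.mp hmin
      rw [hbigL, hpats] at hmem
      obtain ⟨r, hr, hhit⟩ := bigL_fwd hay rules m hmem
      have hmn : ∀ k < m, ∀ r', rules[k]? = some r' → ¬ ruleHit hay.toList r' := by
        intro k hk r' hr' hhit'
        have hmem' := bigL_bwd hay hne rules k r' hr' hhit'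
        rw [← hpats, ← hbigL] at hmem'
        exact absurd (hle k hmem') (by omega)
      have hA : aLoop hay rules = r.1 := aLoop_some hay rules m r hr hhit hmn
      rw [hA]
      show r.1 = ((PySem.List.pyGet? rules ((m : Nat) : Int)).map Prod.fst).getD "Other"
      rw [PySem.List.pyGet?_natCast, hr]
      rfl
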